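-- pv_equiv track=rewrite | github.com/ryuki999/atcoder | ahc/ahc014/a6.py | contain_target_cor
-- ===== SOURCE A (Python) =====
-- def contain_target_cor(cor1, cor2, target_cor):
--     """垂直・水平方向の座標間にある点がないか判定"""
--     step = 1
--     if cor1[0] > cor2[0]:
--         step = -1
--
--     for i in range(cor1[0] + step, cor2[0], step):
--         # if (i, cor1[1]) == target_cor:
--         if cor1 != (i, cor1[1]) and cor2 != (i, cor1[1]) and (i, cor1[1]) == target_cor:
--             return True
--
--     step = 1
--     if cor1[1] > cor2[1]:
--         step = -1
--
--     for i in range(cor1[1] + step, cor2[1], step):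
--         # if (cor1[0], i) == target_cor:
--         if cor1 != (cor1[0], i) and cor2 != (cor1[0], i) and (cor1[0], i) == target_cor:
--             return True
--
--     return False
-- ===== SOURCE B (Python) =====
-- def contain_target_cor(cor1, cor2, target_cor):
--     """O(1) check: target strictly between the two points along a shared axis."""
--     if len(target_cor) != 2:
--         return False
--     tx, ty = target_cor
--     x1, y1 = cor1[0], cor1[1]
--     x2, y2 = cor2[0], cor2[1]
--     hor = ty == y1 and min(x1, x2) < tx < max(x1, x2)
--     ver = tx == x1 and min(y1, y2) < ty < max(y1, y2)
--     return hor or ver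
-- ===== Notes on version B (the rewrite author's own statement) =====
-- stated objective: faster
-- what changed: Replaces A's two O(distance) scans over range(...) candidate points with a closed-form O(1) test: axis-alignment with cor1 plus a strict min/max interval check.
import Mathlib
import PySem

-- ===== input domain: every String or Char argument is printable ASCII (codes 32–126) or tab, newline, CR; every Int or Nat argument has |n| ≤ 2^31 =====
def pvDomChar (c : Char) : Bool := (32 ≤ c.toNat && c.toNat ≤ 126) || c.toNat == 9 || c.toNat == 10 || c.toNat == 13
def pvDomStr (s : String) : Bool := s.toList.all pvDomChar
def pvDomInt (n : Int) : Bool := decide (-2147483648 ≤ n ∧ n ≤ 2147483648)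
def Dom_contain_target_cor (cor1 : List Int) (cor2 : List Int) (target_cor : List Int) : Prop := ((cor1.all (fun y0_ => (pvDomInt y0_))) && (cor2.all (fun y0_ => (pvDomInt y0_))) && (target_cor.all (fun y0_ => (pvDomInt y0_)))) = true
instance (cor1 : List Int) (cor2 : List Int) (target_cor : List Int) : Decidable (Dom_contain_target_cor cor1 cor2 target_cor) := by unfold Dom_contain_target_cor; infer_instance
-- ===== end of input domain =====

-- B replaces A's two O(distance) range scans with an O(1) axis-alignment + strict-interval test.

-- ===== PORT A =====
-- first for-loop: candidate points (i, y1), ported as the 2-element list [i, y1]; 'return True' = stop with true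
def pyLoopH (cor1 : List Int) (cor2 : List Int) (target_cor : List Int) (y1 : Int) : List Int → Bool
  | [] => false
  | i :: rest =>
    if (!(cor1 == [i, y1])) && (!(cor2 == [i, y1])) && (target_cor == [i, y1]) then
      true
    else
      pyLoopH cor1 cor2 target_cor y1 rest

-- second for-loop: candidate points (cor1[0], i)
def pyLoopV (cor1 : List Int) (cor2 : List Int) (target_cor : List Int) (x1 : Int) : List Int → Bool
  | [] => false
  | i :: rest =>
    if (!(cor1 == [x1, i])) && (!(cor2 == [x1, i])) && (target_cor == [x1, i]) then
      true
    else
      pyLoopV cor1 cor2 target_cor x1 rest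

def contain_target_cor (cor1 : List Int) (cor2 : List Int) (target_cor : List Int) : Bool :=
  -- indices 0/1 are in range under Pre_ (lengths ≥ 2), so the .getD 0 default is never taken
  let x1 := (PySem.List.pyGet? cor1 0).getD 0
  let y1 := (PySem.List.pyGet? cor1 1).getD 0
  let x2 := (PySem.List.pyGet? cor2 0).getD 0
  let y2 := (PySem.List.pyGet? cor2 1).getD 0
  let step : Int := if x1 > x2 then -1 else 1
  if pyLoopH cor1 cor2 target_cor y1 (PySem.List.pyRange (x1 + step) x2 step) then
    true
  else
    let step2 : Int := if y1 > y2 then -1 else 1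
    pyLoopV cor1 cor2 target_cor x1 (PySem.List.pyRange (y1 + step2) y2 step2)

-- ===== PORT B =====
def contain_target_cor_alt (cor1 : List Int) (cor2 : List Int) (target_cor : List Int) : Bool :=
  if target_cor.length = 2 then
    let tx := (PySem.List.pyGet? target_cor 0).getD 0
    let ty := (PySem.List.pyGet? target_cor 1).getD 0
    -- indices 0/1 on cor1/cor2 raise in Python on shorter lists (excluded by Pre_)
    let x1 := (PySem.List.pyGet? cor1 0).getD 0
    let y1 := (PySem.List.pyGet? cor1 1).getD 0
    let x2 := (PySem.List.pyGet? cor2 0).getD 0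
    let y2 := (PySem.List.pyGet? cor2 1).getD 0
    let hor := ty == y1 && min x1 x2 < tx && tx < max x1 x2
    let ver := tx == x1 && min y1 y2 < ty && ty < max y1 y2
    hor || ver
  else
    false

-- ===== PRECONDITION & SPEC =====
-- Pre_ excludes only inputs where A raises IndexError: it reads cor1[0], cor1[1], cor2[0], cor2[1].
def Pre_contain_target_cor (cor1 : List Int) (cor2 : List Int) (target_cor : List Int) : Prop :=
  2 ≤ cor1.length ∧ 2 ≤ cor2.length
instance (cor1 : List Int) (cor2 : List Int) (target_cor : List Int) : Decidable (Pre_contain_target_cor cor1 cor2 target_cor) := by unfold Pre_contain_target_cor; infer_instance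
def pvWitness_contain_target_cor : List Int × List Int × List Int := ([0, 0], [2, 3], [5])

def Spec_contain_target_cor (cor1 : List Int) (cor2 : List Int) (target_cor : List Int) (out : Bool) : Prop := out = contain_target_cor_alt cor1 cor2 target_cor
instance (cor1 : List Int) (cor2 : List Int) (target_cor : List Int) (out : Bool) : Decidable (Spec_contain_target_cor cor1 cor2 target_cor out) := by unfold Spec_contain_target_cor; infer_instance

-- ===== CLAIM (what is proved, stated in full; the proofs are below) =====
def Claim_equal_contain_target_cor : Prop := ∀ (cor1 : List Int) (cor2 : List Int) (target_cor : List Int), Dom_contain_target_cor cor1 cor2 target_cor → Pre_contain_target_cor cor1 cor2 target_cor → Spec_contain_target_cor cor1 cor2 target_cor (contain_target_cor cor1 cor2 target_cor)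

-- ===== LEMMAS AND PROOFS =====
theorem pyGet?_one_cons_cons (x y : Int) (l : List Int) :
    PySem.List.pyGet? (x :: y :: l) 1 = some y := by
  have h := PySem.List.pyGet?_ofNat (xs := x :: y :: l) (n := 1) (by simp)
  simpa using h

theorem loopH_eq_any (cor1 cor2 target_cor : List Int) (y1 : Int) (l : List Int) :
    pyLoopH cor1 cor2 target_cor y1 l =
      l.any (fun i => (!(cor1 == [i, y1])) && (!(cor2 == [i, y1])) && (target_cor == [i, y1])) := by
  induction l with
  | nil => rfl
  | cons i rest ih =>
    rw [pyLoopH, List.any_cons, ← ih]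
    by_cases h : ((!(cor1 == [i, y1])) && (!(cor2 == [i, y1])) && (target_cor == [i, y1])) = true <;>
      simp [h]

theorem loopV_eq_any (cor1 cor2 target_cor : List Int) (x1 : Int) (l : List Int) :
    pyLoopV cor1 cor2 target_cor x1 l =
      l.any (fun i => (!(cor1 == [x1, i])) && (!(cor2 == [x1, i])) && (target_cor == [x1, i])) := by
  induction l with
  | nil => rfl
  | cons i rest ih =>
    rw [pyLoopV, List.any_cons, ← ih]
    by_cases h : ((!(cor1 == [x1, i])) && (!(cor2 == [x1, i])) && (target_cor == [x1, i])) = true <;>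
      simp [h]

-- membership in range(u + step, v, step) with step = ±1 chosen by sign: strictly between u and v
theorem mem_pyRange_step (u v i : Int) :
    (i ∈ PySem.List.pyRange (u + (if u > v then -1 else 1)) v (if u > v then -1 else 1)) ↔
      (min u v < i ∧ i < max u v) := by
  split_ifs with h
  · have : u + -1 = u - 1 := by ring
    rw [this, PySem.List.mem_pyRange_neg_one]
    omega
  · rw [PySem.List.mem_pyRange_one]
    omega

theorem A_eq_B (x y p q a b : Int) (c1 c2 : List Int) :
    contain_target_cor (x :: y :: c1) (p :: q :: c2) [a, b] =
      contain_target_cor_alt (x :: y :: c1) (p :: q :: c2) [a, b] := by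
  rw [Bool.eq_iff_iff]
  unfold contain_target_cor contain_target_cor_alt
  simp only [loopH_eq_any, loopV_eq_any, PySem.List.pyGet?_zero_cons, pyGet?_one_cons_cons,
    Option.getD_some, Bool.if_true_left, List.any_eq_true, Bool.and_eq_true, Bool.not_eq_true',
    Bool.or_eq_true, beq_iff_eq, beq_eq_false_iff_ne, ne_eq, List.cons.injEq, and_true,
    List.length_cons, List.length_nil, decide_eq_true_eq]
  simp only [mem_pyRange_step, if_true, Bool.or_eq_true, Bool.and_eq_true, beq_iff_eq,
    decide_eq_true_eq]
  constructor
  · rintro (⟨i, hi, -, hai, hby⟩ | ⟨i, hi, -, hax, hbi⟩)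
    · exact Or.inl (by omega)
    · exact Or.inr (by omega)
  · rintro (⟨⟨hby, h1⟩, h2⟩ | ⟨⟨hax, h1⟩, h2⟩)
    · refine Or.inl ⟨a, by omega, ⟨?_, ?_⟩, rfl, hby⟩
      · rintro ⟨h', -, -⟩
        omega
      · rintro ⟨h', -, -⟩
        omega
    · refine Or.inr ⟨b, by omega, ⟨?_, ?_⟩, hax, rfl⟩
      · rintro ⟨-, h', -⟩
        omega
      · rintro ⟨-, h', -⟩
        omega

theorem A_eq_B_bad_target (x y p q : Int) (c1 c2 t : List Int) (ht : t.length ≠ 2) :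
    contain_target_cor (x :: y :: c1) (p :: q :: c2) t =
      contain_target_cor_alt (x :: y :: c1) (p :: q :: c2) t := by
  rw [Bool.eq_iff_iff]
  unfold contain_target_cor contain_target_cor_alt
  have hne : ∀ u v : Int, ¬(t = [u, v]) := by
    intro u v h
    exact ht (by simp [h])
  simp only [loopH_eq_any, loopV_eq_any, PySem.List.pyGet?_zero_cons, pyGet?_one_cons_cons,
    Option.getD_some, Bool.if_true_left, List.any_eq_true, Bool.and_eq_true, Bool.not_eq_true',
    Bool.or_eq_true, beq_iff_eq, beq_eq_false_iff_ne, ne_eq, if_neg ht, decide_eq_true_eq]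
  constructor
  · rintro (⟨i, -, -, h⟩ | ⟨i, -, -, h⟩) <;> exact absurd h (hne _ _)
  · rintro ⟨⟩

-- ===== VERDICT (by name: the statement is the Claim_ definition above) =====
theorem contain_target_cor_spec : Claim_equal_contain_target_cor := by
  intro cor1 cor2 target_cor _ hpre
  unfold Spec_contain_target_cor
  obtain ⟨h1, h2⟩ := hpre
  rcases cor1 with _ | ⟨x, _ | ⟨y, c1⟩⟩ <;> simp at h1
  rcases cor2 with _ | ⟨p, _ | ⟨q, c2⟩⟩ <;> simp at h2
  by_cases ht : target_cor.length = 2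
  · rcases target_cor with _ | ⟨a, _ | ⟨b, _ | ⟨z, t⟩⟩⟩ <;> simp at ht
    exact A_eq_B x y p q a b c1 c2
  · exact A_eq_B_bad_target x y p q c1 c2 target_cor ht
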